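-- pv_equiv track=rewrite | github.com/lorddusk/AdventOfCode2020 | day6/main.py | createGroupedInput
-- ===== SOURCE A (Python) =====
-- def createGroupedInput(input):
--     groups = [[]] * len(input)
--     current = 0
--     for line in input:
--         if line == "":
--             current += 1
--         else:
--             if groups[current] == []:
--                 groups[current] = [line]
--             else:
--                 groups[current].append(line)
--     filtered = list(filter(None, groups))
--     return filtered
-- ===== SOURCE B (Python) =====
-- def createGroupedInput(input):
--     groups = []
--     run = []
--     for line in input:
--         if line == "":
--             if run:
--                 groups.append(run)
--                 run = []
--         else:
--             run.append(line)
--     if run: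
--         groups.append(run)
--     return groups
-- ===== Notes on version B (the rewrite author's own statement) =====
-- stated objective: simpler
-- what changed: Replaces the preallocated slot table indexed by a blank-line counter plus a final truthiness filter with a single forward pass that keeps only the current run buffer, flushing it at separators and at the end, so no filter step is needed.
import Mathlib
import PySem

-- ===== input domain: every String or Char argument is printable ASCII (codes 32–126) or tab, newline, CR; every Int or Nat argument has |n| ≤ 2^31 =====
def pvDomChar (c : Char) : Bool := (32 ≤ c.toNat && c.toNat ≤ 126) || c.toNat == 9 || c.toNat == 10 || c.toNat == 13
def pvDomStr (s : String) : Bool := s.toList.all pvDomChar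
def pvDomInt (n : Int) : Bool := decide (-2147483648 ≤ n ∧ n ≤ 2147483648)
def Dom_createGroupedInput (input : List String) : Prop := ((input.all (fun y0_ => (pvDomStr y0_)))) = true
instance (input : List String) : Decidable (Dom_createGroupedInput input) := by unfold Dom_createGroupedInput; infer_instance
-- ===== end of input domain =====

-- B replaces A's preallocated slot table + blank-line counter + final filter with a single
-- pass keeping only the current run buffer, flushed at separators and at the end (objective: simpler).

-- ===== PORT A =====
-- the for loop over `input` with state (groups, current), as structural recursion
def pvA_loop : List String → List (List String) → Nat → (List (List String) × Nat)
  | [], groups, current => (groups, current)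
  | line :: rest, groups, current =>
    if line = "" then pvA_loop rest groups (current + 1)
    else
      if groups.getD current [] = [] then
        pvA_loop rest (groups.set current [line]) current
      else
        pvA_loop rest (groups.set current (groups.getD current [] ++ [line])) current
-- note: Python indexes groups[current]; on every reachable state the index is in range
-- (current = #blanks seen ≤ position of the current non-blank line < len(input)), so
-- getD/set are exact here.

def createGroupedInput (input : List String) : List (List String) :=
  let st := pvA_loop input (List.replicate input.length []) 0
  st.1.filter (fun g => !g.isEmpty)   -- list(filter(None, groups)): keep non-empty lists

-- ===== PORT B =====
def pvB_loop : List String → List (List String) → List String → (List (List String) × List String)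
  | [], groups, run => (groups, run)
  | line :: rest, groups, run =>
    if line = "" then
      if !run.isEmpty then pvB_loop rest (groups ++ [run]) []
      else pvB_loop rest groups run
    else pvB_loop rest groups (run ++ [line])

def createGroupedInput_alt (input : List String) : List (List String) :=
  let st := pvB_loop input [] []
  if !st.2.isEmpty then st.1 ++ [st.2] else st.1

-- ===== PRECONDITION & SPEC =====
def Spec_createGroupedInput (input : List String) (out : List (List String)) : Prop := out = createGroupedInput_alt input
instance (input : List String) (out : List (List String)) : Decidable (Spec_createGroupedInput input out) := by unfold Spec_createGroupedInput; infer_instance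

-- ===== CLAIM (what is proved, stated in full; the proofs are below) =====
def Claim_equal_createGroupedInput : Prop := ∀ (input : List String), Dom_createGroupedInput input → Spec_createGroupedInput input (createGroupedInput input)

-- ===== LEMMAS AND PROOFS =====

-- the blank-separated blocks of a list, including empty blocks, given an open run
def pvBlocks (run : List String) : List String → List (List String)
  | [] => [run]
  | l :: ls => if l = "" then run :: pvBlocks [] ls else pvBlocks (run ++ [l]) ls

def pvFlush (st : List (List String) × List String) : List (List String) :=
  if !st.2.isEmpty then st.1 ++ [st.2] else st.1

lemma getD_mid (d : List (List String)) (run : List String) (t : List (List String)) :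
    (d ++ run :: t).getD d.length [] = run := by
  induction d with
  | nil => rfl
  | cons x xs ih => simp [ih]

lemma set_mid (d : List (List String)) (run v : List String) (t : List (List String)) :
    (d ++ run :: t).set d.length v = d ++ v :: t := by
  induction d with
  | nil => rfl
  | cons x xs ih => simp [ih]

lemma lemA : ∀ (s : List String) (d : List (List String)) (run : List String) (k : Nat),
    s.length ≤ k + 1 →
    ((pvA_loop s (d ++ run :: List.replicate k []) d.length).1).filter (fun g => !g.isEmpty)
      = (d ++ pvBlocks run s).filter (fun g => !g.isEmpty) := by
  intro s
  induction s with
  | nil =>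
    intro d run k _
    simp [pvA_loop, pvBlocks, List.filter_append, List.filter_cons]
  | cons l ls ih =>
    intro d run k hk
    by_cases hl : l = ""
    · subst hl
      cases k with
      | zero =>
        -- no slot left: ls must be empty
        have hls : ls = [] := by
          cases ls with
          | nil => rfl
          | cons a as => simp at hk
        subst hls
        simp [pvA_loop, pvBlocks, List.filter_append, List.filter_cons]
      | succ k' =>
        have h1 : d ++ run :: List.replicate (k' + 1) ([] : List String)
            = (d ++ [run]) ++ ([] : List String) :: List.replicate k' [] := by
          simp [List.replicate_succ]
        have h2 : d.length + 1 = (d ++ [run]).length := by simp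
        have := ih (d ++ [run]) [] k' (by simpa using Nat.le_of_succ_le_succ hk)
        show (pvA_loop ("" :: ls) (d ++ run :: List.replicate (k' + 1) []) d.length).1.filter
            (fun g => !g.isEmpty) = _
        rw [show pvA_loop ("" :: ls) (d ++ run :: List.replicate (k' + 1) []) d.length
            = pvA_loop ls (d ++ run :: List.replicate (k' + 1) []) (d.length + 1) from by
          simp [pvA_loop]]
        rw [h1, h2, this]
        simp [pvBlocks, List.filter_append]
    · have hget : (d ++ run :: List.replicate k ([] : List String)).getD d.length [] = run :=
        getD_mid d run _
      have hset : ∀ v, (d ++ run :: List.replicate k ([] : List String)).set d.length v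
          = d ++ v :: List.replicate k [] := fun v => set_mid d run v _
      have hk' : ls.length ≤ k + 1 := by
        simpa using Nat.le_of_succ_le (by simpa using hk)
      have ihr := ih d (run ++ [l]) k hk'
      rw [show pvA_loop (l :: ls) (d ++ run :: List.replicate k []) d.length
          = (if (d ++ run :: List.replicate k []).getD d.length [] = [] then
              pvA_loop ls ((d ++ run :: List.replicate k []).set d.length [l]) d.length
            else
              pvA_loop ls ((d ++ run :: List.replicate k []).set d.length
                ((d ++ run :: List.replicate k []).getD d.length [] ++ [l])) d.length) from by
        simp [pvA_loop, hl]]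
      rw [hget]
      by_cases hrun : run = []
      · subst hrun
        rw [hset [l]]
        simpa [pvBlocks, hl] using ih d [l] k hk'
      · rw [if_neg hrun, hset (run ++ [l])]
        simpa [pvBlocks, hl] using ihr

lemma lemB : ∀ (s : List String) (g : List (List String)) (run : List String),
    pvFlush (pvB_loop s g run) = g ++ (pvBlocks run s).filter (fun g => !g.isEmpty) := by
  intro s
  induction s with
  | nil =>
    intro g run
    by_cases h : run = [] <;> simp [pvB_loop, pvBlocks, pvFlush, h]
  | cons l ls ih =>
    intro g run
    by_cases hl : l = ""
    · subst hl
      by_cases h : run = []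
      · subst h
        rw [show pvB_loop ("" :: ls) g [] = pvB_loop ls g [] from by simp [pvB_loop]]
        simpa [pvBlocks] using ih g []
      · rw [show pvB_loop ("" :: ls) g run = pvB_loop ls (g ++ [run]) [] from by
          simp [pvB_loop, h]]
        rw [ih (g ++ [run]) []]
        simp [pvBlocks, h]
    · rw [show pvB_loop (l :: ls) g run = pvB_loop ls g (run ++ [l]) from by
        simp [pvB_loop, hl]]
      rw [ih g (run ++ [l])]
      simp [pvBlocks, hl]

-- ===== VERDICT (by name: the statement is the Claim_ definition above) =====
theorem createGroupedInput_spec : Claim_equal_createGroupedInput := by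
  intro input _
  unfold Spec_createGroupedInput createGroupedInput createGroupedInput_alt
  have hB : (let st := pvB_loop input [] []
      if !st.2.isEmpty then st.1 ++ [st.2] else st.1) = pvFlush (pvB_loop input [] []) := rfl
  rw [hB, lemB input [] []]
  cases input with
  | nil => simp [pvA_loop, pvBlocks]
  | cons l ls =>
    have h1 : List.replicate (l :: ls).length ([] : List String)
        = [] ++ ([] : List String) :: List.replicate ls.length [] := by
      simp [List.replicate_succ]
    have h0 : (0 : ℕ) = ([] : List (List String)).length := rfl
    rw [h1, h0, lemA (l :: ls) [] [] ls.length (by simp)]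
    simp
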